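-- pv_equiv track=rewrite | github.com/PlatformLab/NanoLog | PreProcessor/parser.py | printLogMsgArgs
-- ===== SOURCE A (Python) =====
-- def printLogMsgArgs(lines, listOfArgs):
--   returnString = ""
--
--   for arg in listOfArgs:
--     returnString += "\nArg:\t"
--     if arg[0] == arg[2]:
--       returnString += lines[arg[0]][arg[1]:arg[3]]
--     else:
--       returnString += lines[arg[0]][arg[1]:]
--       for li in range(arg[0]+1, arg[2]):
--         returnString += lines[li]
--       returnString += lines[arg[2]][:arg[3]]
--
--   return returnString
-- ===== SOURCE B (Python) =====
-- def printLogMsgArgs(lines, listOfArgs):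
--   parts = []
--   for (r0, c0, r1, c1) in listOfArgs:
--     block = lines[r0:r1 + 1]
--     block[-1] = block[-1][:c1]
--     block[0] = block[0][c0:]
--     parts.append("\nArg:\t" + "".join(block))
--   return "".join(parts)
-- ===== Notes on version B (the rewrite author's own statement) =====
-- stated objective: simpler
-- what changed: B replaces A's two-case branch (same-line slice vs first-tail + middle-line range loop + last-head) and its string accumulator with one uniform slice-and-join pass: take the line block lines[r0:r1+1], trim its last line to c1 and its first line from c0 (the order makes the single-line case collapse to lines[r0][c0:c1]), and join everything at the end.
-- outside the precondition, e.g. on printLogMsgArgs(['ab', 'cd'], [(-1, 0, -1, 1)]): A returns '\nArg:\tc', B raises IndexError; on printLogMsgArgs(['ab', 'cd'], [(1, 0, 0, 1)]): A returns '\nArg:\tcda', B raises IndexError; on printLogMsgArgs(['abcde'], [(0, -3, 0, 4)]): A returns '\nArg:\tcd', B returns '\nArg:\tbcd'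
import Mathlib
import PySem

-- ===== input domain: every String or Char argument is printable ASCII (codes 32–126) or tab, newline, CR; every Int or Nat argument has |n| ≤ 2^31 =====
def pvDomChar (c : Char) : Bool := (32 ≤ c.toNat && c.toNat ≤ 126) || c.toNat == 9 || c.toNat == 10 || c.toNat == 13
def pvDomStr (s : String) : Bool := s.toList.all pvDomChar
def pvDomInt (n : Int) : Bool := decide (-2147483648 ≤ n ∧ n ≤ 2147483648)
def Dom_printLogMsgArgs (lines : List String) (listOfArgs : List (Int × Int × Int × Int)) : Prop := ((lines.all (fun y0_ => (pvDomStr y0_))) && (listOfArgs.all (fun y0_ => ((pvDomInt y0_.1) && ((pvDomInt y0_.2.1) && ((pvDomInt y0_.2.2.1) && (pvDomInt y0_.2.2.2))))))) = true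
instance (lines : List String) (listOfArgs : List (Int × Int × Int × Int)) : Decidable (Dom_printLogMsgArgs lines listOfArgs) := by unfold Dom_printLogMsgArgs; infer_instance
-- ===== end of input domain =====

-- B replaces A's two-case branch and middle-line loop by one uniform slice-trim-join pass per arg (objective: simpler).


-- ===== PORT A =====
-- strings are handled on the List Char side (PySem.Chars convention); same loop structure as A
def printLogMsgArgs (lines : List String) (listOfArgs : List (Int × Int × Int × Int)) : String :=
  String.ofList <|
    listOfArgs.foldl (fun ret arg =>
      let ret := ret ++ "\nArg:\t".toList
      if arg.1 == arg.2.2.1 then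
        ret ++ PySem.List.slice (PySem.List.pyGetD lines arg.1 "").toList (some arg.2.1) (some arg.2.2.2)
      else
        let ret := ret ++ PySem.List.slice (PySem.List.pyGetD lines arg.1 "").toList (some arg.2.1) none
        let ret := (PySem.List.pyRange (arg.1 + 1) arg.2.2.1 1).foldl
          (fun r li => r ++ (PySem.List.pyGetD lines li "").toList) ret
        ret ++ PySem.List.slice (PySem.List.pyGetD lines arg.2.2.1 "").toList none (some arg.2.2.2)) []

-- ===== PORT B =====
-- one arg's span: block = lines[r0:r1+1]; block[-1] = block[-1][:c1]; block[0] = block[0][c0:]; "\nArg:\t" + "".join(block)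
def pvArgSpan (lines : List String) (arg : Int × Int × Int × Int) : List Char :=
  let block := (PySem.List.slice lines (some arg.1) (some (arg.2.2.1 + 1))).map String.toList
  let block := PySem.List.pySetD block (-1)
      (PySem.List.slice (PySem.List.pyGetD block (-1) []) none (some arg.2.2.2))
  let block := PySem.List.pySetD block 0
      (PySem.List.slice (PySem.List.pyGetD block 0 []) (some arg.2.1) none)
  "\nArg:\t".toList ++ PySem.Chars.join [] block

def printLogMsgArgs_alt (lines : List String) (listOfArgs : List (Int × Int × Int × Int)) : String :=
  String.ofList (PySem.Chars.join [] (listOfArgs.map (pvArgSpan lines)))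

-- ===== PRECONDITION & SPEC =====
-- Pre_ keeps exactly the well-formed parser spans: rows in range and ordered (r0 ≤ r1) and columns non-negative.
-- Out-of-range rows make A raise IndexError; on negative rows (Python wraparound) and on r1 < r0 the natural B
-- raises IndexError where A returns; negative column offsets are end-relative trimmings on which both programs'
-- clamped-slice values are accidental and no caller would specify either.
def Pre_printLogMsgArgs (lines : List String) (listOfArgs : List (Int × Int × Int × Int)) : Prop :=
  ∀ a ∈ listOfArgs, 0 ≤ a.2.1 ∧ 0 ≤ a.2.2.2 ∧ 0 ≤ a.1 ∧ a.1 ≤ a.2.2.1 ∧ a.2.2.1 < (lines.length : Int)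
instance (lines : List String) (listOfArgs : List (Int × Int × Int × Int)) : Decidable (Pre_printLogMsgArgs lines listOfArgs) := by unfold Pre_printLogMsgArgs; infer_instance
def pvWitness_printLogMsgArgs : List String × (List (Int × Int × Int × Int)) :=
  (["abc d", "ef"], [(0, 1, 1, 1), (0, 0, 0, 2)])

def Spec_printLogMsgArgs (lines : List String) (listOfArgs : List (Int × Int × Int × Int)) (out : String) : Prop := out = printLogMsgArgs_alt lines listOfArgs
instance (lines : List String) (listOfArgs : List (Int × Int × Int × Int)) (out : String) : Decidable (Spec_printLogMsgArgs lines listOfArgs out) := by unfold Spec_printLogMsgArgs; infer_instance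

-- ===== CLAIM (what is proved, stated in full; the proofs are below) =====
def Claim_equal_printLogMsgArgs : Prop := ∀ (lines : List String) (listOfArgs : List (Int × Int × Int × Int)), Dom_printLogMsgArgs lines listOfArgs → Pre_printLogMsgArgs lines listOfArgs → Spec_printLogMsgArgs lines listOfArgs (printLogMsgArgs lines listOfArgs)

-- ===== LEMMAS AND PROOFS =====

-- the per-arg contribution of A's loop body
def pvPieceA (lines : List String) (arg : Int × Int × Int × Int) : List Char :=
  "\nArg:\t".toList ++
  (if arg.1 == arg.2.2.1 then
     PySem.List.slice (PySem.List.pyGetD lines arg.1 "").toList (some arg.2.1) (some arg.2.2.2)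
   else
     PySem.List.slice (PySem.List.pyGetD lines arg.1 "").toList (some arg.2.1) none
       ++ (PySem.List.pyRange (arg.1 + 1) arg.2.2.1 1).flatMap (fun li => (PySem.List.pyGetD lines li "").toList)
       ++ PySem.List.slice (PySem.List.pyGetD lines arg.2.2.1 "").toList none (some arg.2.2.2))

lemma pvJoinNil (parts : List (List Char)) : PySem.Chars.join [] parts = parts.flatten := by
  induction parts with
  | nil => rfl
  | cons x xs ih =>
    cases xs with
    | nil => simp [PySem.Chars.join, List.intercalate]
    | cons y ys =>
      show [] ++ x ++ List.intercalate [] (y::ys) = _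
      simp only [List.nil_append]
      rw [show List.intercalate ([]:List Char) (y::ys) = PySem.Chars.join [] (y::ys) from rfl, ih]
      simp

lemma pvSetNegOne {α : Type} (xs : List α) (v : α) (h : xs ≠ []) :
    PySem.List.pySetD xs (-1) v = xs.set (xs.length - 1) v := by
  have hl : 0 < xs.length := List.length_pos_iff.mpr h
  simp only [PySem.List.pySetD, PySem.List.pySet?, PySem.List.pyIdx?]
  split_ifs <;> try omega
  simp

lemma pvSetNegOneApp {α : Type} (xs : List α) (x v : α) :
    PySem.List.pySetD (xs ++ [x]) (-1) v = xs ++ [v] := by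
  rw [pvSetNegOne _ _ (by simp)]
  simp

lemma pvSegDecomp {α : Type} [Inhabited α] (L : List α) (n0 n1 : Nat) (h01 : n0 < n1) (h1 : n1 < L.length) :
    (L.drop n0).take (n1 + 1 - n0) = L[n0] :: ((L.drop (n0+1)).take (n1 - n0 - 1)) ++ [L[n1]] := by
  rw [List.drop_eq_getElem_cons (show n0 < L.length by omega)]
  rw [show n1 + 1 - n0 = (n1 - n0 - 1 + 1) + 1 by omega]
  rw [List.take_cons (by omega), show n1 - n0 - 1 + 1 + 1 - 1 = n1 - n0 - 1 + 1 by omega, List.take_add_one]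
  have h : (L.drop (n0+1))[n1 - n0 - 1]? = some L[n1] := by
    rw [List.getElem?_drop, List.getElem?_eq_getElem (by omega)]
    congr 1; congr 1; omega
  rw [h]; simp

lemma pvRangeFlat (L : List String) (b : Nat) (hb : b ≤ L.length) :
    ∀ (d a : Nat), b - a ≤ d →
    (PySem.List.pyRange (a:Int) (b:Int) 1).flatMap (fun li => (PySem.List.pyGetD L li "").toList)
      = (((L.drop a).take (b - a)).map String.toList).flatten := by
  intro d
  induction d with
  | zero =>
    intro a h
    rw [PySem.List.pyRange_one_eq_nil (by omega)]
    rw [show b - a = 0 by omega]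
    simp
  | succ d ih =>
    intro a h
    by_cases hab : a < b
    · rw [PySem.List.pyRange_one_cons (by exact_mod_cast hab)]
      rw [show ((a:Int) + 1) = ((a+1 : Nat) : Int) by push_cast; ring]
      rw [List.flatMap_cons, ih (a+1) (by omega)]
      have hget : PySem.List.pyGetD L (a:Int) "" = L[a]'(by omega) := by
        simp [List.getD_eq_getElem?_getD, List.getElem?_eq_getElem (show a < L.length by omega)]
      rw [hget]
      rw [show (L.drop a).take (b - a) = L[a]'(by omega) :: (L.drop (a+1)).take (b - (a+1)) by
        rw [List.drop_eq_getElem_cons (show a < L.length by omega)]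
        rw [show b - a = (b - (a+1)) + 1 by omega, List.take_cons (by omega)]
        rfl]
      simp
    · rw [PySem.List.pyRange_one_eq_nil (by exact_mod_cast Int.ofNat_le.mpr (by omega))]
      rw [show b - a = 0 by omega]
      simp

lemma pvPieceEq (lines : List String) (n0 n1 m0 m1 : Nat) (h01 : n0 ≤ n1) (h1 : n1 < lines.length) :
    pvPieceA lines ((n0:Int), (m0:Int), (n1:Int), (m1:Int))
      = pvArgSpan lines ((n0:Int), (m0:Int), (n1:Int), (m1:Int)) := by
  have hget : ∀ (n : Nat) (hn : n < lines.length), PySem.List.pyGetD lines (n:Int) "" = lines[n] := by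
    intro n hn
    simp [List.getD_eq_getElem?_getD, List.getElem?_eq_getElem hn]
  unfold pvPieceA pvArgSpan
  have hslice : PySem.List.slice lines (some (n0:Int)) (some ((n1:Int) + 1))
      = (lines.drop n0).take (n1 + 1 - n0) := by
    rw [show ((n1:Int) + 1) = ((n1+1 : Nat) : Int) by push_cast; ring]
    exact PySem.List.slice_natCast ..
  rcases Nat.eq_or_lt_of_le h01 with heq | hlt
  · subst heq
    rw [if_pos (by simp)]
    rw [hslice, show n0 + 1 - n0 = 1 by omega]
    rw [show List.take 1 (lines.drop n0) = [lines[n0]] from by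
      rw [List.drop_eq_getElem_cons (show n0 < lines.length by omega)]; rfl]
    simp only [List.map_cons, List.map_nil]
    rw [show PySem.List.pyGetD [lines[n0].toList] (-1) [] = lines[n0].toList from rfl]
    rw [show ∀ v : List Char, PySem.List.pySetD [lines[n0].toList] (-1) v = [v] from fun v => rfl]
    rw [PySem.List.slice_to_natCast]
    rw [show ∀ x : List Char, PySem.List.pyGetD [x] 0 [] = x from fun x => rfl]
    rw [show ∀ x v : List Char, PySem.List.pySetD [x] 0 v = [v] from fun x v => rfl]
    rw [PySem.List.slice_from_natCast, pvJoinNil]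
    rw [hget n0 (by omega), PySem.List.slice_natCast]
    simp [List.drop_take]
  · rw [if_neg (by simp; omega)]
    rw [hslice, pvSegDecomp lines n0 n1 hlt h1]
    simp only [List.map_cons, List.map_append, List.map_nil]
    rw [show (lines[n0].toList :: (((lines.drop (n0+1)).take (n1-n0-1)).map String.toList) ++ [lines[n1].toList])
          = ((lines[n0].toList :: ((lines.drop (n0+1)).take (n1-n0-1)).map String.toList) ++ [lines[n1].toList]) from rfl]
    rw [PySem.List.pyGetD_neg_one_append_singleton, pvSetNegOneApp]
    simp only [PySem.List.slice_to_natCast, PySem.List.slice_from_natCast, List.cons_append]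
    rw [PySem.List.pyGetD_zero_cons]
    rw [show ∀ (x v : List Char) (l : List (List Char)), PySem.List.pySetD (x :: l) 0 v = v :: l from fun x v l => by
      simp [PySem.List.pySetD, PySem.List.pySet?, PySem.List.pyIdx?]]
    rw [pvJoinNil, hget n0 (by omega), hget n1 h1]
    rw [show ((n0:Int) + 1) = ((n0+1 : Nat) : Int) by push_cast; ring]
    rw [pvRangeFlat lines n1 (by omega) (n1 - (n0+1)) (n0+1) (by omega)]
    simp [show n1 - (n0+1) = n1 - n0 - 1 by omega]

lemma pvFoldA (lines : List String) (args : List (Int × Int × Int × Int)) : ∀ ret : List Char,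
    args.foldl (fun ret arg =>
      let ret := ret ++ "\nArg:\t".toList
      if arg.1 == arg.2.2.1 then
        ret ++ PySem.List.slice (PySem.List.pyGetD lines arg.1 "").toList (some arg.2.1) (some arg.2.2.2)
      else
        let ret := ret ++ PySem.List.slice (PySem.List.pyGetD lines arg.1 "").toList (some arg.2.1) none
        let ret := (PySem.List.pyRange (arg.1 + 1) arg.2.2.1 1).foldl
          (fun r li => r ++ (PySem.List.pyGetD lines li "").toList) ret
        ret ++ PySem.List.slice (PySem.List.pyGetD lines arg.2.2.1 "").toList none (some arg.2.2.2)) ret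
      = ret ++ (args.map (pvPieceA lines)).flatten := by
  induction args with
  | nil => simp
  | cons a as ih =>
    intro ret
    rw [List.foldl_cons, ih]
    have hbody : ∀ r : List Char,
        (let r1 := r ++ "\nArg:\t".toList
         if a.1 == a.2.2.1 then
           r1 ++ PySem.List.slice (PySem.List.pyGetD lines a.1 "").toList (some a.2.1) (some a.2.2.2)
         else
           let r2 := r1 ++ PySem.List.slice (PySem.List.pyGetD lines a.1 "").toList (some a.2.1) none
           let r3 := (PySem.List.pyRange (a.1 + 1) a.2.2.1 1).foldl
             (fun r li => r ++ (PySem.List.pyGetD lines li "").toList) r2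
           r3 ++ PySem.List.slice (PySem.List.pyGetD lines a.2.2.1 "").toList none (some a.2.2.2))
        = r ++ pvPieceA lines a := by
      intro r
      by_cases h : a.1 == a.2.2.1
      · simp [pvPieceA, h, List.append_assoc]
      · simp only [pvPieceA, h, if_false, Bool.false_eq_true]
        rw [PySem.List.foldl_append_eq_flatMap]
        simp [List.append_assoc]
    rw [hbody]
    simp [List.append_assoc]

-- ===== VERDICT (by name: the statement is the Claim_ definition above) =====
theorem printLogMsgArgs_spec : Claim_equal_printLogMsgArgs := by
  intro lines args hdom hpre
  unfold Spec_printLogMsgArgs printLogMsgArgs printLogMsgArgs_alt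
  rw [pvFoldA, pvJoinNil, List.nil_append]
  apply congrArg
  apply congrArg
  apply List.map_congr_left
  intro a ha
  obtain ⟨hc0, hc1, hr0, hr01, hr1⟩ := hpre a ha
  obtain ⟨r0, c0, r1, c1⟩ := a
  simp only at hc0 hc1 hr0 hr01 hr1 ⊢
  rw [show r0 = ((r0.toNat : Nat) : Int) by omega, show c0 = ((c0.toNat : Nat) : Int) by omega,
      show r1 = ((r1.toNat : Nat) : Int) by omega, show c1 = ((c1.toNat : Nat) : Int) by omega]
  exact pvPieceEq lines r0.toNat r1.toNat c0.toNat c1.toNat (by omega) (by omega)
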